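-- pv_equiv track=rewrite | github.com/Jormii/AdventOfCode | 2024/15/part2.py | _chain_reaction_hor
-- ===== SOURCE A (Python) =====
-- from typing import Dict, List, Set, Tuple
--
-- PointT = Tuple[int, int]
--
-- def _chain_reaction_hor(
--         r: int,
--         c: int,
--         vc: int,
--         walls: Set[PointT],
--         boxes: Dict[PointT, bool]
-- ) -> Set[PointT]:
--     if vc == -1:
--         c_n = c - 1
--     else:
--         c_n = c + 2
--
--     if (r, c_n) in walls:
--         return set()
--
--     points = {(r, c)}
--     if (r, c_n) in boxes:
--         is_head = boxes[r, c_n]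
--         if not is_head:
--             c_n -= 1
--
--         p = _chain_reaction_hor(r, c_n, vc, walls, boxes)
--         if len(p) == 0:
--             return set()
--         else:
--             points.update(p)
--
--     return points
-- ===== SOURCE B (Python) =====
-- def _collect_chain_cells(r, c, vc, walls, boxes):
--     # Phase 1: walk the box chain once, collecting cells as a plain list.
--     # Returns None if the walk runs into a wall.
--     cells = []
--     while True:
--         cells.append((r, c))
--         c_n = c - 1 if vc == -1 else c + 2
--         if (r, c_n) in walls:
--             return None
--         if (r, c_n) not in boxes:
--             return cells
--         c = c_n if boxes[r, c_n] else c_n - 1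
--
--
-- def _chain_reaction_hor(r, c, vc, walls, boxes):
--     # Phase 2: one set conversion at the end (empty on a wall hit).
--     cells = _collect_chain_cells(r, c, vc, walls, boxes)
--     return set() if cells is None else set(cells)
-- ===== Notes on version B (the rewrite author's own statement) =====
-- stated objective: simpler
-- what changed: Split the work into two phases: an iterative walk that collects the chain cells into a plain list (returning None on a wall) and a single final set() conversion, replacing A's recursion that builds a fresh set at every level and merges the inner set upward.
import Mathlib
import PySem

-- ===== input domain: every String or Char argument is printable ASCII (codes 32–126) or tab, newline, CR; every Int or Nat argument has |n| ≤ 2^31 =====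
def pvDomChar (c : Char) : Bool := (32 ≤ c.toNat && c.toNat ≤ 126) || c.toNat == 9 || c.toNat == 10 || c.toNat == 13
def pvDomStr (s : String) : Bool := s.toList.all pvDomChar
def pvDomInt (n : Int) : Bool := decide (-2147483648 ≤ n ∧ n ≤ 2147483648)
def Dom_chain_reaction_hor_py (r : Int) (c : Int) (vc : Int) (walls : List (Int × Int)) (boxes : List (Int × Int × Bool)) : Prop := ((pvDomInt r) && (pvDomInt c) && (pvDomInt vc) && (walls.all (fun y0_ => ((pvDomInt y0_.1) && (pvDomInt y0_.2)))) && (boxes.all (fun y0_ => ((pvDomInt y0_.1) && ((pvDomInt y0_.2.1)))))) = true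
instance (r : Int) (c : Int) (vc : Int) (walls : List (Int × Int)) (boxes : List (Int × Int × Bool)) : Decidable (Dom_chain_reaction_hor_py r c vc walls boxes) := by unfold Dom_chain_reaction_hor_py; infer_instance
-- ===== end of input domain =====

-- B is two-phase: an iterative walk collects the chain cells as a plain list (None on a wall
-- hit), then one set() conversion at the end — replacing A's recursion that builds a fresh set
-- per level and merges the inner set upward; objective: simpler.
-- Both ports use fuel (boxes.length + 1) purely as a totality guard: each step of the Python
-- consumes a strictly farther box key, so the real chain length never exceeds it.

-- ===== PORT A =====
-- the first if of A: c_n = c - 1 if vc == -1 else c + 2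
def pvCn (vc : Int) (c : Int) : Int := if vc = -1 then c - 1 else c + 2
-- the head/tail correction: if not is_head: c_n -= 1
def pvAdj (isHead : Bool) (cn : Int) : Int := if !isHead then cn - 1 else cn
-- dict lookup: first entry of boxes with key (r, cn)
def pvFindBox (boxes : List (Int × Int × Bool)) (r : Int) (cn : Int) : Option (Int × Int × Bool) :=
  boxes.find? (fun b => b.1 == r && b.2.1 == cn)

def chainA_go (walls : List (Int × Int)) (boxes : List (Int × Int × Bool)) (vc : Int)
    (fuel : Nat) (r : Int) (c : Int) : List (Int × Int) :=
  match fuel with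
  | 0 => []
  | fuel + 1 =>
    if walls.contains (r, pvCn vc c) then []
    else
      match pvFindBox boxes r (pvCn vc c) with
      | none => PySem.Set.ofList [(r, c)]
      | some b =>
        if (chainA_go walls boxes vc fuel r (pvAdj b.2.2 (pvCn vc c))).length = 0 then []
        else PySem.Set.update (PySem.Set.ofList [(r, c)])
          (chainA_go walls boxes vc fuel r (pvAdj b.2.2 (pvCn vc c)))

def chain_reaction_hor_py (r : Int) (c : Int) (vc : Int) (walls : List (Int × Int)) (boxes : List (Int × Int × Bool)) : List (Int × Int) :=
  chainA_go walls boxes vc (boxes.length + 1) r c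

-- ===== PORT B =====
-- phase 1: the while-loop of _collect_chain_cells, accumulating the plain list `cells`;
-- `none` models Python's None (wall hit)
def chainB_collect (walls : List (Int × Int)) (boxes : List (Int × Int × Bool)) (vc : Int)
    (fuel : Nat) (cells : List (Int × Int)) (r : Int) (c : Int) : Option (List (Int × Int)) :=
  match fuel with
  | 0 => none
  | fuel + 1 =>
    let cells' := cells ++ [(r, c)]
    let nc : Int := if vc = -1 then c - 1 else c + 2
    if walls.contains (r, nc) then none
    else
      match boxes.find? (fun b => b.1 == r && b.2.1 == nc) with
      | none => some cells'
      | some b => chainB_collect walls boxes vc fuel cells' r (if b.2.2 then nc else nc - 1)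

-- phase 2: set() if cells is None else set(cells)
def chain_reaction_hor_py_alt (r : Int) (c : Int) (vc : Int) (walls : List (Int × Int)) (boxes : List (Int × Int × Bool)) : List (Int × Int) :=
  match chainB_collect walls boxes vc (boxes.length + 1) [] r c with
  | none => PySem.Set.empty
  | some cells => PySem.Set.ofList cells

-- ===== PRECONDITION & SPEC =====
def Spec_chain_reaction_hor_py (r : Int) (c : Int) (vc : Int) (walls : List (Int × Int)) (boxes : List (Int × Int × Bool)) (out : List (Int × Int)) : Prop := out = chain_reaction_hor_py_alt r c vc walls boxes
instance (r : Int) (c : Int) (vc : Int) (walls : List (Int × Int)) (boxes : List (Int × Int × Bool)) (out : List (Int × Int)) : Decidable (Spec_chain_reaction_hor_py r c vc walls boxes out) := by unfold Spec_chain_reaction_hor_py; infer_instance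

-- ===== CLAIM =====
def Claim_equal_chain_reaction_hor_py : Prop := ∀ (r : Int) (c : Int) (vc : Int) (walls : List (Int × Int)) (boxes : List (Int × Int × Bool)), Dom_chain_reaction_hor_py r c vc walls boxes → Spec_chain_reaction_hor_py r c vc walls boxes (chain_reaction_hor_py r c vc walls boxes)

-- ===== LEMMAS AND PROOFS =====

-- proof-only: the chain cells built front-to-back without an accumulator
def chainC (walls : List (Int × Int)) (boxes : List (Int × Int × Bool)) (vc : Int)
    (fuel : Nat) (r : Int) (c : Int) : Option (List (Int × Int)) :=
  match fuel with
  | 0 => none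
  | fuel + 1 =>
    if walls.contains (r, pvCn vc c) then none
    else
      match pvFindBox boxes r (pvCn vc c) with
      | none => some [(r, c)]
      | some b => (chainC walls boxes vc fuel r (pvAdj b.2.2 (pvCn vc c))).map ((r, c) :: ·)

theorem pv_adj_eq (h : Bool) (cn : Int) : (if h then cn else cn - 1) = pvAdj h cn := by
  cases h <;> rfl

-- B's accumulator loop = the cons-style collector prefixed with the accumulator
theorem pv_collect_eq_chainC (walls : List (Int × Int)) (boxes : List (Int × Int × Bool)) (vc : Int) :
    ∀ (fuel : Nat) (cells : List (Int × Int)) (r c : Int),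
      chainB_collect walls boxes vc fuel cells r c
        = (chainC walls boxes vc fuel r c).map (cells ++ ·) := by
  intro fuel
  induction fuel with
  | zero => intro cells r c; rfl
  | succ fuel ih =>
    intro cells r c
    unfold chainB_collect chainC
    simp only [pvCn, pvFindBox, pv_adj_eq]
    split <;>
    · split
      · rfl
      · split
        · rfl
        · rename_i b _
          rw [ih]
          cases chainC walls boxes vc fuel r (pvAdj b.2.2 _) <;> simp

theorem pv_chainC_ne_nil (walls : List (Int × Int)) (boxes : List (Int × Int × Bool)) (vc : Int) :
    ∀ (fuel : Nat) (r c : Int) (l : List (Int × Int)),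
      chainC walls boxes vc fuel r c = some l → l ≠ [] := by
  intro fuel
  induction fuel with
  | zero => intro r c l h; exact absurd h (by simp [chainC])
  | succ fuel ih =>
    intro r c l h
    unfold chainC at h
    split at h
    · exact absurd h (by simp)
    · split at h
      · simp only [Option.some.injEq] at h; subst h; simp
      · cases hc : chainC walls boxes vc fuel r _ <;> rw [hc] at h <;> simp at h
        subst h; simp

theorem pv_update_ofList {α : Type} [BEq α] [LawfulBEq α] (s xs : List α) :
    PySem.Set.update s (PySem.Set.ofList xs) = PySem.Set.update s xs := by
  rw [PySem.Set.update_eq_append_filter, PySem.Set.update_eq_append_filter,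
    PySem.Set.ofList_ofList]

-- A's recursive set construction = set(chainC cells) (empty list on a wall hit)
theorem pv_chainA_eq_chainC (walls : List (Int × Int)) (boxes : List (Int × Int × Bool)) (vc : Int) :
    ∀ (fuel : Nat) (r c : Int),
      chainA_go walls boxes vc fuel r c
        = match chainC walls boxes vc fuel r c with
          | none => []
          | some l => PySem.Set.ofList l := by
  intro fuel
  induction fuel with
  | zero => intro r c; rfl
  | succ fuel ih =>
    intro r c
    unfold chainA_go chainC
    split
    · rfl
    · split
      · rfl
      · rename_i b _
        rw [ih]
        cases hc : chainC walls boxes vc fuel r (pvAdj b.2.2 (pvCn vc c)) with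
        | none => simp
        | some rest =>
          obtain ⟨x, t, rfl⟩ := List.exists_cons_of_ne_nil
            (pv_chainC_ne_nil walls boxes vc fuel _ _ _ hc)
          show (if (PySem.Set.ofList (x :: t)).length = 0 then []
              else PySem.Set.update (PySem.Set.ofList [(r, c)]) (PySem.Set.ofList (x :: t)))
            = PySem.Set.ofList ((r, c) :: x :: t)
          rw [if_neg (by rw [PySem.Set.ofList_cons]; simp)]
          rw [pv_update_ofList, show ((r, c) :: x :: t) = [(r, c)] ++ (x :: t) from rfl,
            PySem.Set.ofList_append]

-- ===== VERDICT =====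
theorem chain_reaction_hor_py_spec : Claim_equal_chain_reaction_hor_py := by
  intro r c vc walls boxes _
  unfold Spec_chain_reaction_hor_py chain_reaction_hor_py chain_reaction_hor_py_alt
  rw [pv_collect_eq_chainC, pv_chainA_eq_chainC]
  cases chainC walls boxes vc (boxes.length + 1) r c <;> simp [PySem.Set.empty]
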